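-- pv_equiv track=rewrite | github.com/ankits1626/cerra_ai | app/receipt_approver/utils.py | find_brand_user_input
-- ===== SOURCE A (Python) =====
-- def find_brand_user_input(user_input):
--     brand_lookup = {
--         "Alain Mikli": ["Alain Mikli"],
--         "Armani Exchange": ["Armani Exchange"],
--         "Burberry": ["Burberry", "Burberry Junior"],
--         "Chanel": ["Chanel"],
--         "Coach": ["Coach"],
--         "Dolce & Gabbana": ["Dolce & Gabbana"],
--         "Emporio Armani": ["Emporio Armani", "Emporio Armani Kids"],
--         "Giorgio Armani": ["Giorgio Armani"],
--         "Michael Kors": ["Michael Kors"],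
--         "Miu Miu": ["Miu Miu"],
--         "Oakley": [
--             "Oakley",
--             "Oakley Kids",
--         ],
--         "Oliver Peoples": [
--             "Oliver Peoples",
--         ],
--         "Persol": ["Persol"],
--         "Prada": ["Prada", "Prada Linea Rossa"],
--         "Ray-Ban": [
--             "Ray-Ban",
--             "Rayban",
--         ],
--         "Starck Eyes": ["Starck Eyes"],
--         "Tiffany": ["Tiffany & Co."],
--         "Versace": [
--             "Versace",
--             "Versace Kids",
--         ],
--         "Vogue": ["Vogue Eyewear", "Vogue"],
--         "Bvlgari": ["Bvlgari"],
--         "Polo Ralph Lauren": ["Polo Ralph Lauren"],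
--         "Swarovski": ["Swarovski "],
--         "Miraflex": ["Miraflex"],
--         "Jimmy Choo": ["Jimmy Choo"],
--     }
--
--     for brand, codes in brand_lookup.items():
--         if user_input in codes:
--             return brand
--     return None
-- ===== SOURCE B (Python) =====
-- # Binary search over a code->brand table kept sorted by code (codes are unique).
-- _CODE_BRAND = [
--     ("Alain Mikli", "Alain Mikli"),
--     ("Armani Exchange", "Armani Exchange"),
--     ("Burberry", "Burberry"),
--     ("Burberry Junior", "Burberry"),
--     ("Bvlgari", "Bvlgari"),
--     ("Chanel", "Chanel"),
--     ("Coach", "Coach"),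
--     ("Dolce & Gabbana", "Dolce & Gabbana"),
--     ("Emporio Armani", "Emporio Armani"),
--     ("Emporio Armani Kids", "Emporio Armani"),
--     ("Giorgio Armani", "Giorgio Armani"),
--     ("Jimmy Choo", "Jimmy Choo"),
--     ("Michael Kors", "Michael Kors"),
--     ("Miraflex", "Miraflex"),
--     ("Miu Miu", "Miu Miu"),
--     ("Oakley", "Oakley"),
--     ("Oakley Kids", "Oakley"),
--     ("Oliver Peoples", "Oliver Peoples"),
--     ("Persol", "Persol"),
--     ("Polo Ralph Lauren", "Polo Ralph Lauren"),
--     ("Prada", "Prada"),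
--     ("Prada Linea Rossa", "Prada"),
--     ("Ray-Ban", "Ray-Ban"),
--     ("Rayban", "Ray-Ban"),
--     ("Starck Eyes", "Starck Eyes"),
--     ("Swarovski ", "Swarovski"),
--     ("Tiffany & Co.", "Tiffany"),
--     ("Versace", "Versace"),
--     ("Versace Kids", "Versace"),
--     ("Vogue", "Vogue"),
--     ("Vogue Eyewear", "Vogue"),
-- ]
--
--
-- def find_brand_user_input(user_input):
--     lo, hi = 0, len(_CODE_BRAND)
--     while lo < hi:
--         mid = (lo + hi) // 2
--         if _CODE_BRAND[mid][0] < user_input: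
--             lo = mid + 1
--         else:
--             hi = mid
--     if lo < len(_CODE_BRAND) and _CODE_BRAND[lo][0] == user_input:
--         return _CODE_BRAND[lo][1]
--     return None
-- ===== Notes on version B (the rewrite author's own statement) =====
-- stated objective: alternative
-- what changed: Replaces A's linear scan of per-brand code lists with a flat code->brand table kept sorted by code and a hand-written lower-bound binary search, answering in O(log n) comparisons.
import Mathlib
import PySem

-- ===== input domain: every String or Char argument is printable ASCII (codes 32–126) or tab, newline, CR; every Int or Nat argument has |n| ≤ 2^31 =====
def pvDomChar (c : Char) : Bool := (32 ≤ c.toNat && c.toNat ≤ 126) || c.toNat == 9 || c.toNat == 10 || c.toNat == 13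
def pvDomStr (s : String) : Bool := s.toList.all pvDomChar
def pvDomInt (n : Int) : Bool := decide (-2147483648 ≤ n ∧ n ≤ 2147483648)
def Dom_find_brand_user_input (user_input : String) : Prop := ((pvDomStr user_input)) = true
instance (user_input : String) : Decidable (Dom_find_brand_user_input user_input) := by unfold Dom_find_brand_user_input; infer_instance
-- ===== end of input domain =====

-- B replaces A's linear scan over per-brand code lists with a flat code→brand table
-- sorted by code and a hand-written lower-bound binary search (alternative algorithm).

-- ===== PORT A =====
-- the brand_lookup literal of A, in source order
def pvBrandLookup : List (String × List String) := [
  ("Alain Mikli", ["Alain Mikli"]),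
  ("Armani Exchange", ["Armani Exchange"]),
  ("Burberry", ["Burberry", "Burberry Junior"]),
  ("Chanel", ["Chanel"]),
  ("Coach", ["Coach"]),
  ("Dolce & Gabbana", ["Dolce & Gabbana"]),
  ("Emporio Armani", ["Emporio Armani", "Emporio Armani Kids"]),
  ("Giorgio Armani", ["Giorgio Armani"]),
  ("Michael Kors", ["Michael Kors"]),
  ("Miu Miu", ["Miu Miu"]),
  ("Oakley", ["Oakley", "Oakley Kids"]),
  ("Oliver Peoples", ["Oliver Peoples"]),
  ("Persol", ["Persol"]),
  ("Prada", ["Prada", "Prada Linea Rossa"]),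
  ("Ray-Ban", ["Ray-Ban", "Rayban"]),
  ("Starck Eyes", ["Starck Eyes"]),
  ("Tiffany", ["Tiffany & Co."]),
  ("Versace", ["Versace", "Versace Kids"]),
  ("Vogue", ["Vogue Eyewear", "Vogue"]),
  ("Bvlgari", ["Bvlgari"]),
  ("Polo Ralph Lauren", ["Polo Ralph Lauren"]),
  ("Swarovski", ["Swarovski "]),
  ("Miraflex", ["Miraflex"]),
  ("Jimmy Choo", ["Jimmy Choo"])]

-- A's for-loop with early return: scan brands, 'user_input in codes' membership test
def pvScanA (l : List (String × List String)) (s : String) : Option String :=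
  match l with
  | [] => none
  | (brand, codes) :: rest => if codes.contains s then some brand else pvScanA rest s

def find_brand_user_input (user_input : String) : Option String :=
  pvScanA pvBrandLookup user_input

-- ===== PORT B =====
-- Source B's _CODE_BRAND literal: the flat (code, brand) table, sorted by code
def pvCodeBrand : List (String × String) := [
  ("Alain Mikli", "Alain Mikli"),
  ("Armani Exchange", "Armani Exchange"),
  ("Burberry", "Burberry"),
  ("Burberry Junior", "Burberry"),
  ("Bvlgari", "Bvlgari"),
  ("Chanel", "Chanel"),
  ("Coach", "Coach"),
  ("Dolce & Gabbana", "Dolce & Gabbana"),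
  ("Emporio Armani", "Emporio Armani"),
  ("Emporio Armani Kids", "Emporio Armani"),
  ("Giorgio Armani", "Giorgio Armani"),
  ("Jimmy Choo", "Jimmy Choo"),
  ("Michael Kors", "Michael Kors"),
  ("Miraflex", "Miraflex"),
  ("Miu Miu", "Miu Miu"),
  ("Oakley", "Oakley"),
  ("Oakley Kids", "Oakley"),
  ("Oliver Peoples", "Oliver Peoples"),
  ("Persol", "Persol"),
  ("Polo Ralph Lauren", "Polo Ralph Lauren"),
  ("Prada", "Prada"),
  ("Prada Linea Rossa", "Prada"),
  ("Ray-Ban", "Ray-Ban"),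
  ("Rayban", "Ray-Ban"),
  ("Starck Eyes", "Starck Eyes"),
  ("Swarovski ", "Swarovski"),
  ("Tiffany & Co.", "Tiffany"),
  ("Versace", "Versace"),
  ("Versace Kids", "Versace"),
  ("Vogue", "Vogue"),
  ("Vogue Eyewear", "Vogue")]

-- _CODE_BRAND[i][0] (indices produced by the loop are always in range; ("","") is never hit)
def pvKey (i : Nat) : String := (pvCodeBrand.getD i ("", "")).1

-- Source B's while-loop, lower-bound binary search; Python's str '<' is code-point
-- lexicographic = '<' on toList (PySem.Chars.strLt); fuel bounds the iteration count
-- (hi - lo strictly decreases each step, so fuel = table length is always enough)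
def pvBSLoop (s : String) (fuel lo hi : Nat) : Nat :=
  match fuel with
  | 0 => lo
  | fuel + 1 =>
    if lo < hi then
      let mid := (lo + hi) / 2
      if PySem.Chars.strLt (pvKey mid).toList s.toList then pvBSLoop s fuel (mid + 1) hi
      else pvBSLoop s fuel lo mid
    else lo

-- the final 'if lo < len and codes[lo] == s: return brand; return None'
def pvFinish (s : String) (lo : Nat) : Option String :=
  if lo < pvCodeBrand.length && pvKey lo == s then some (pvCodeBrand.getD lo ("", "")).2
  else none

def find_brand_user_input_alt (user_input : String) : Option String :=
  pvFinish user_input (pvBSLoop user_input pvCodeBrand.length 0 pvCodeBrand.length)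

-- ===== PRECONDITION & SPEC =====
def Spec_find_brand_user_input (user_input : String) (out : Option String) : Prop := out = find_brand_user_input_alt user_input
instance (user_input : String) (out : Option String) : Decidable (Spec_find_brand_user_input user_input out) := by unfold Spec_find_brand_user_input; infer_instance

-- ===== CLAIM (what is proved, stated in full; the proofs are below) =====
def Claim_equal_find_brand_user_input : Prop := ∀ (user_input : String), Dom_find_brand_user_input user_input → Spec_find_brand_user_input user_input (find_brand_user_input user_input)

-- ===== LEMMAS AND PROOFS =====

-- all codes occurring anywhere in either table
def pvAllCodes : List String :=
  ["Alain Mikli", "Armani Exchange", "Burberry", "Burberry Junior", "Bvlgari",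
   "Chanel", "Coach", "Dolce & Gabbana", "Emporio Armani", "Emporio Armani Kids",
   "Giorgio Armani", "Jimmy Choo", "Michael Kors", "Miraflex", "Miu Miu",
   "Oakley", "Oakley Kids", "Oliver Peoples", "Persol", "Polo Ralph Lauren",
   "Prada", "Prada Linea Rossa", "Ray-Ban", "Rayban", "Starck Eyes",
   "Swarovski ", "Tiffany & Co.", "Versace", "Versace Kids", "Vogue", "Vogue Eyewear"]

set_option maxRecDepth 8192 in
lemma pvCodesA : ∀ p ∈ pvBrandLookup, ∀ c ∈ p.2, c ∈ pvAllCodes := by decide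

set_option maxRecDepth 8192 in
lemma pvCodesB : ∀ p ∈ pvCodeBrand, p.1 ∈ pvAllCodes := by decide

lemma pvScanA_none (l : List (String × List String)) (s : String)
    (h : ∀ p ∈ l, ∀ c ∈ p.2, c ≠ s) : pvScanA l s = none := by
  induction l with
  | nil => rfl
  | cons p rest ih =>
    obtain ⟨brand, codes⟩ := p
    have hnotin : s ∉ codes := fun hs => h _ List.mem_cons_self s hs rfl
    have hc : codes.contains s = false := by simpa using hnotin
    simp only [pvScanA, hc, Bool.false_eq_true, if_false]
    exact ih (fun p hp => h p (List.mem_cons_of_mem _ hp))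

lemma pvFinish_none (s : String) (lo : Nat) (h : ∀ p ∈ pvCodeBrand, p.1 ≠ s) :
    pvFinish s lo = none := by
  unfold pvFinish
  by_cases hlt : lo < pvCodeBrand.length
  · have hmem : pvCodeBrand.getD lo ("", "") ∈ pvCodeBrand := by
      rw [List.getD_eq_getElem pvCodeBrand ("", "") hlt]
      exact List.getElem_mem _
    have hne : (pvKey lo == s) = false := beq_eq_false_iff_ne.mpr (h _ hmem)
    simp [hne]
  · simp [hlt]

-- ===== VERDICT (by name: the statement is the Claim_ definition above) =====
set_option maxRecDepth 8192 in
theorem find_brand_user_input_spec : Claim_equal_find_brand_user_input := by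
  intro s _
  show find_brand_user_input s = find_brand_user_input_alt s
  by_cases hmem : s ∈ pvAllCodes
  · simp only [pvAllCodes, List.mem_cons, List.not_mem_nil, or_false] at hmem
    rcases hmem with rfl|rfl|rfl|rfl|rfl|rfl|rfl|rfl|rfl|rfl|rfl|rfl|rfl|rfl|rfl|rfl|rfl|rfl|rfl|rfl|rfl|rfl|rfl|rfl|rfl|rfl|rfl|rfl|rfl|rfl|rfl <;> decide
  · have hA : find_brand_user_input s = none :=
      pvScanA_none _ s (fun p hp c hc hcs => hmem (hcs ▸ pvCodesA p hp c hc))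
    have hB : find_brand_user_input_alt s = none :=
      pvFinish_none s _ (fun p hp hps => hmem (hps ▸ pvCodesB p hp))
    rw [hA, hB]
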